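-- pv_equiv track=rewrite | github.com/jbkinney/24_posfai2 | posfai2.py | get_ohe_spec_str
-- ===== SOURCE A (Python) =====
-- import itertools
--
-- def get_ohe_spec_str(L, n_order, n_adj=None):
--     """
--     Function to get ohe_spec for any order and num adjacent.
--     :param L: (int > 0)
--         Length of sequence.
--     :param n_order: (int >= 0)
--         Highest order of interaction.
--     :param n_adj: (int >= 0)
--         Maximum span of interaction across positions.
--     :return: ohe_spec
--         String specification of one-hot encoding.
--     """
--
--     # If n_adj is not specified, assume use L
--     if n_adj is None:
--         n_adj = L
--
--     # Create list of all iterables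
--     its = []
--     for i in range(L - n_adj + 1):
--         subset = range(i, i + n_adj)
--         for m in range(n_order+1):
--             p = list(itertools.combinations(subset,m))
--             its.extend(p)
--         #p = [s for s in powerset(subset) if len(s) <= n_order]
--     its = sorted(set(its), key=lambda x: (len(x), *x))
--     its = [[f'{i:d}' for i in it] for it in its]
--     spec_str = '.' + '+'.join(['x'.join(it) for it in its])
--
--     # TODO: Fix so that this call is not needed
--     # Flip parts
--     #spec_str = flip_parts_in_spec_str(spec_str)
--
--     return spec_str
-- ===== SOURCE B (Python) =====
-- def _combs(lo, hi, m):
--     # combinations of range(lo, hi) of size m, lexicographic order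
--     if m == 0:
--         return [[]]
--     return [[v] + tail for v in range(lo, hi - m + 1) for tail in _combs(v + 1, hi, m - 1)]
--
-- def get_ohe_spec_str(L, n_order, n_adj=None):
--     # Enumerate each position-subset with span < n_adj exactly once, directly in
--     # (length, elements) order: no overlapping windows, no dedup, no sort.
--     if n_adj is None:
--         n_adj = L
--     if n_adj > L or n_order < 0:
--         return '.'
--     parts = ['']
--     if n_adj > 0:
--         for m in range(1, n_order + 1):
--             for a in range(L):
--                 for tail in _combs(a + 1, min(a + n_adj, L), m - 1):
--                     parts.append('x'.join(str(v) for v in [a] + tail))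
--     return '.' + '+'.join(parts)
-- ===== Notes on version B (the rewrite author's own statement) =====
-- stated objective: faster
-- what changed: Instead of generating every combination inside every overlapping length-n_adj window and then deduplicating with set() and sorting by (len, *tuple), B enumerates each bounded-span subset exactly once, directly in the final (length, elements) order, so the set() and sorted() passes disappear.
import Mathlib
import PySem

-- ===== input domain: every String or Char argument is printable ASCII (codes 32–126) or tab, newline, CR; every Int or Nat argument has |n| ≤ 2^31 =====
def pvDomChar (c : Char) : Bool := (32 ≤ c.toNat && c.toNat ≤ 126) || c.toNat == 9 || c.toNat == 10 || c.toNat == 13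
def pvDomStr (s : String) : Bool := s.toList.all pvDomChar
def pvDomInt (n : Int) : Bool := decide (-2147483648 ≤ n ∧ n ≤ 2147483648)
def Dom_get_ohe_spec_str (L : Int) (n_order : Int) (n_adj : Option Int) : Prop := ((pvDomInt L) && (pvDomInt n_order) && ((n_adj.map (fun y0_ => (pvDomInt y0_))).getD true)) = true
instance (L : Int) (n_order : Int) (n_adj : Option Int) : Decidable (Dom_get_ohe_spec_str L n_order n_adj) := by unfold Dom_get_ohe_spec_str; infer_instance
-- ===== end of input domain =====

-- B replaces A's per-window combination generation + set() dedup + sort with one direct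
-- enumeration of the bounded-span subsets in the final output order (objective: faster).

-- ===== PORT A =====
-- itertools.combinations(pool, m), ported by hand (exact: same tuples, same
-- lexicographic-by-index order).
def combosA : List Int → Nat → List (List Int)
  | _, 0 => [[]]
  | [], _ + 1 => []
  | x :: xs, m + 1 => (combosA xs m).map (fun t => x :: t) ++ combosA xs (m + 1)

def get_ohe_spec_str (L : Int) (n_order : Int) (n_adj : Option Int) : String :=
  let na : Int := match n_adj with | none => L | some v => v
  let its : List (List Int) :=
    (PySem.List.pyRange 0 (L - na + 1) 1).foldl (fun its i =>
      (PySem.List.pyRange 0 (n_order + 1) 1).foldl (fun its m =>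
        its ++ combosA (PySem.List.pyRange i (i + na) 1) m.toNat) its) []
  -- sorted(set(its), key=lambda x: (len(x), *x)): the variadic tuple key is ported as
  -- the Int list (len(x) :: x) compared lexicographically (exact: all components are ints)
  let its2 := PySem.List.sorted (PySem.Set.ofList its) (fun x => (x.length : Int) :: x)
  "." ++ PySem.Str.join "+" (its2.map (fun it => PySem.Str.join "x" (it.map PySem.Int.toStr)))

-- ===== PORT B =====
-- _combs(lo, hi, m) from Source B: combinations of range(lo, hi) of size m, lex order.
def combsB (lo hi : Int) : Nat → List (List Int)
  | 0 => [[]]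
  | m + 1 => (PySem.List.pyRange lo (hi - m) 1).flatMap
      (fun v => (combsB (v + 1) hi m).map (fun t => v :: t))

def get_ohe_spec_str_alt (L : Int) (n_order : Int) (n_adj : Option Int) : String :=
  let na : Int := match n_adj with | none => L | some v => v
  if na > L ∨ n_order < 0 then "."
  else
    let parts : List String :=
      if na > 0 then
        [""] ++ (PySem.List.pyRange 1 (n_order + 1) 1).flatMap (fun m =>
          (PySem.List.pyRange 0 L 1).flatMap (fun a =>
            (combsB (a + 1) (min (a + na) L) (m - 1).toNat).map (fun tail =>
              PySem.Str.join "x" ((a :: tail).map PySem.Int.toStr))))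
      else [""]
    "." ++ PySem.Str.join "+" parts

-- ===== PRECONDITION & SPEC =====
def Spec_get_ohe_spec_str (L : Int) (n_order : Int) (n_adj : Option Int) (out : String) : Prop := out = get_ohe_spec_str_alt L n_order n_adj
instance (L : Int) (n_order : Int) (n_adj : Option Int) (out : String) : Decidable (Spec_get_ohe_spec_str L n_order n_adj out) := by unfold Spec_get_ohe_spec_str; infer_instance

-- ===== CLAIM (what is proved, stated in full; the proofs are below) =====
def Claim_equal_get_ohe_spec_str : Prop := ∀ (L : Int) (n_order : Int) (n_adj : Option Int), Dom_get_ohe_spec_str L n_order n_adj → Spec_get_ohe_spec_str L n_order n_adj (get_ohe_spec_str L n_order n_adj)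

-- ===== LEMMAS AND PROOFS =====

-- A's sort key
def pvKey (x : List Int) : List Int := (x.length : Int) :: x

-- B's tuple list, before formatting
def pvCanon (L n_order na : Int) : List (List Int) :=
  [[]] ++ (PySem.List.pyRange 1 (n_order + 1) 1).flatMap (fun m =>
    (PySem.List.pyRange 0 L 1).flatMap (fun a =>
      (combsB (a + 1) (min (a + na) L) (m - 1).toNat).map (fun tail => a :: tail)))

-- A's raw, duplicate-carrying list
def pvIts (L n_order na : Int) : List (List Int) :=
  (PySem.List.pyRange 0 (L - na + 1) 1).flatMap (fun i =>
    (PySem.List.pyRange 0 (n_order + 1) 1).flatMap (fun m =>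
      combosA (PySem.List.pyRange i (i + na) 1) m.toNat))

-- key-order helper lemmas
theorem pvKey_lt_of_len_lt {x y : List Int} (h : x.length < y.length) : pvKey x < pvKey y := by
  rw [pvKey, pvKey, List.cons_lt_cons_iff]; left; exact_mod_cast h

theorem pvKey_lt_of_head_lt {a b : Int} {s u : List Int} (hl : s.length = u.length)
    (h : a < b) : pvKey (a :: s) < pvKey (b :: u) := by
  rw [pvKey, pvKey, List.cons_lt_cons_iff]
  refine Or.inr ⟨by simp [hl], ?_⟩
  rw [List.cons_lt_cons_iff]; exact Or.inl h

theorem pvKey_lt_of_tail_lt {a : Int} {s u : List Int} (hl : s.length = u.length)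
    (h : s < u) : pvKey (a :: s) < pvKey (a :: u) := by
  rw [pvKey, pvKey, List.cons_lt_cons_iff]
  refine Or.inr ⟨by simp [hl], ?_⟩
  rw [List.cons_lt_cons_iff]; exact Or.inr ⟨rfl, h⟩

-- a strictly increasing list of ints inside (a, b) forces a + length < b
theorem pv_bound (t : List Int) (a b : Int) (hp : t.Pairwise (· < ·))
    (hb : ∀ x ∈ t, a < x ∧ x < b) (hne : t ≠ []) : a + t.length < b := by
  induction t generalizing a with
  | nil => exact absurd rfl hne
  | cons x rest ih =>
    obtain ⟨hax, hxb⟩ := hb x (by simp)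
    by_cases hr : rest = []
    · subst hr; simp; omega
    · have := ih x hp.of_cons
        (fun y hy => ⟨(List.pairwise_cons.mp hp).1 y hy, (hb y (by simp [hy])).2⟩) hr
      simp only [List.length_cons]
      push_cast at this ⊢
      omega

-- membership in the hand-ported itertools.combinations
theorem mem_combosA (pool : List Int) (m : Nat) (t : List Int) :
    t ∈ combosA pool m ↔ t.Sublist pool ∧ t.length = m := by
  induction pool generalizing m t with
  | nil =>
    cases m with
    | zero =>
      simp only [combosA, List.mem_singleton, List.sublist_nil]
      constructor
      · rintro rfl; simp
      · rintro ⟨rfl, _⟩; rfl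
    | succ m =>
      simp only [combosA, List.not_mem_nil, false_iff, not_and, List.sublist_nil]
      rintro rfl; simp
  | cons x xs ih =>
    cases m with
    | zero =>
      simp only [combosA, List.mem_singleton]
      constructor
      · rintro rfl; simp
      · rintro ⟨_, h2⟩; rw [List.length_eq_zero_iff] at h2; exact h2
    | succ m =>
      simp only [combosA, List.mem_append, List.mem_map, ih]
      constructor
      · rintro (⟨s, ⟨hs, hl⟩, rfl⟩ | ⟨hs, hl⟩)
        · exact ⟨List.Sublist.cons₂ x hs, by simp [hl]⟩
        · exact ⟨List.Sublist.cons x hs, hl⟩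
      · rintro ⟨hs, hl⟩
        cases hs with
        | cons _ h => exact Or.inr ⟨h, hl⟩
        | cons₂ _ h => exact Or.inl ⟨_, ⟨h, by simpa using hl⟩, rfl⟩

-- sublists of range(lo, hi) = strictly increasing lists with entries in [lo, hi)
theorem sublist_pyRange_iff (t : List Int) (lo hi : Int) :
    t.Sublist (PySem.List.pyRange lo hi 1) ↔
      t.Pairwise (· < ·) ∧ ∀ x ∈ t, lo ≤ x ∧ x < hi := by
  constructor
  · intro h
    refine ⟨(PySem.List.pairwise_lt_pyRange_one lo hi).sublist h, fun x hx => ?_⟩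
    have := h.mem hx
    rwa [PySem.List.mem_pyRange_one] at this
  · rintro ⟨hp, hb⟩
    induction t generalizing lo with
    | nil => simp
    | cons x rest ih =>
      obtain ⟨hlo, hhi⟩ := hb x (by simp)
      have h2 : List.Sublist (x :: rest) (PySem.List.pyRange x hi 1) := by
        rw [PySem.List.pyRange_one_cons hhi]
        exact List.Sublist.cons₂ x (ih (x + 1) hp.of_cons
          (fun y hy => ⟨by have := (List.pairwise_cons.mp hp).1 y hy; omega,
            (hb y (by simp [hy])).2⟩) : List.Sublist rest (PySem.List.pyRange (x + 1) hi 1))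
      refine h2.trans ?_
      rw [PySem.List.pyRange_one_append lo x hi hlo (le_of_lt hhi)]
      exact List.sublist_append_right _ _

-- membership in B's combination generator
theorem mem_combsB (m : Nat) (lo hi : Int) (t : List Int) :
    t ∈ combsB lo hi m ↔
      t.length = m ∧ t.Pairwise (· < ·) ∧ ∀ x ∈ t, lo ≤ x ∧ x < hi := by
  induction m generalizing lo t with
  | zero =>
    simp only [combsB, List.mem_singleton]
    constructor
    · rintro rfl; simp
    · rintro ⟨h, _, _⟩; rw [List.length_eq_zero_iff] at h; exact h
  | succ m ih =>
    simp only [combsB, List.mem_flatMap, List.mem_map, PySem.List.mem_pyRange_one]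
    constructor
    · rintro ⟨v, ⟨hlo, hv⟩, tail, htail, rfl⟩
      obtain ⟨hl, hp, hb⟩ := (ih (v + 1) tail).mp htail
      refine ⟨by simp [hl], List.pairwise_cons.mpr
        ⟨fun y hy => by have := (hb y hy).1; omega, hp⟩, ?_⟩
      intro x hx
      rcases List.mem_cons.mp hx with rfl | hx'
      · exact ⟨hlo, by omega⟩
      · have := hb x hx'; omega
    · rintro ⟨hl, hp, hb⟩
      cases t with
      | nil => simp at hl
      | cons v tail =>
        obtain ⟨hlo, hhi⟩ := hb v (by simp)
        have hlt : tail.length = m := by simpa using hl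
        have hvm : v < hi - m := by
          by_cases hne : tail = []
          · subst hne; simp at hlt; omega
          · have := pv_bound tail v hi hp.of_cons
              (fun y hy => ⟨(List.pairwise_cons.mp hp).1 y hy, (hb y (by simp [hy])).2⟩) hne
            omega
        refine ⟨v, ⟨hlo, hvm⟩, tail, ?_, rfl⟩
        refine (ih (v + 1) tail).mpr ⟨hlt, hp.of_cons, ?_⟩
        intro y hy
        exact ⟨by have := (List.pairwise_cons.mp hp).1 y hy; omega, (hb y (by simp [hy])).2⟩

-- combsB yields its tuples in strictly increasing lexicographic order
theorem pairwise_combsB (m : Nat) (lo hi : Int) :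
    (combsB lo hi m).Pairwise (· < ·) := by
  induction m generalizing lo with
  | zero => simp [combsB]
  | succ m ih =>
    rw [combsB, List.pairwise_flatMap]
    refine ⟨fun v _ => ?_, ?_⟩
    · rw [List.pairwise_map]
      exact (ih (v + 1)).imp (fun h => List.cons_lt_cons_self.mpr h)
    · refine (PySem.List.pairwise_lt_pyRange_one lo (hi - m)).imp_of_mem ?_
      intro v w hv hw hvw x hx y hy
      obtain ⟨s, _, rfl⟩ := List.mem_map.mp hx
      obtain ⟨u, _, rfl⟩ := List.mem_map.mp hy
      rw [List.cons_lt_cons_iff]; exact Or.inl hvw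

-- A's raw list, rewritten from the nested foldl to a double flatMap
theorem itsA_eq (L n_order na : Int) :
    ((PySem.List.pyRange 0 (L - na + 1) 1).foldl (fun its i =>
      (PySem.List.pyRange 0 (n_order + 1) 1).foldl (fun its m =>
        its ++ combosA (PySem.List.pyRange i (i + na) 1) m.toNat) its) []) =
    pvIts L n_order na := by
  rw [pvIts]
  simp only [PySem.List.foldl_append_eq_flatMap]
  simp

-- the two characterizations coincide (the window-covering argument)
theorem mem_its_iff_mem_canon (L n_order na : Int) (h1 : na ≤ L) (h2 : 0 ≤ n_order)
    (h3 : 0 < na) (t : List Int) :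
    t ∈ pvIts L n_order na ↔ t ∈ pvCanon L n_order na := by
  simp only [pvIts, pvCanon, List.mem_flatMap, PySem.List.mem_pyRange_one, mem_combosA,
    sublist_pyRange_iff, List.cons_append, List.nil_append, List.mem_cons, List.mem_map,
    mem_combsB]
  constructor
  · rintro ⟨i, ⟨hi0, hiL⟩, m, ⟨hm0, hmN⟩, ⟨⟨hp, hb⟩, hlen⟩⟩
    cases t with
    | nil => exact Or.inl rfl
    | cons a tail =>
      right
      obtain ⟨hia, hani⟩ := hb a (by simp)
      have hlen' : (tail.length : Int) = m - 1 := by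
        simp only [List.length_cons] at hlen; omega
      refine ⟨(tail.length : Int) + 1, ⟨by omega, by omega⟩,
        a, ⟨by omega, by omega⟩, tail, ⟨by omega,
          hp.of_cons, ?_⟩, rfl⟩
      intro y hy
      obtain ⟨hiy, hyni⟩ := hb y (by simp [hy])
      have hay := (List.pairwise_cons.mp hp).1 y hy
      exact ⟨by omega, lt_min (by omega) (by omega)⟩
  · rintro (rfl | ⟨m, ⟨hm1, hmN⟩, a, ⟨ha0, haL⟩, tail, ⟨hlen, hp, hb⟩, rfl⟩)
    · exact ⟨0, ⟨le_refl 0, by omega⟩, 0, ⟨le_refl 0, by omega⟩, ⟨⟨by simp, by simp⟩, by simp⟩⟩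
    · have hi1 : min a (L - na) ≤ a := min_le_left _ _
      have hi2 : min a (L - na) ≤ L - na := min_le_right _ _
      have hi3 : min a (L - na) = a ∨ min a (L - na) = L - na := min_choice a (L - na)
      have hlen' : (tail.length : Int) = m - 1 := by
        rw [hlen]; omega
      refine ⟨min a (L - na), ⟨by omega, by omega⟩, (tail.length : Int) + 1,
        ⟨by omega, by omega⟩,
        ⟨⟨List.pairwise_cons.mpr ⟨fun y hy => by have := (hb y hy).1; omega, hp⟩, ?_⟩,
          by simp only [List.length_cons]; omega⟩⟩
      intro x hx
      rcases List.mem_cons.mp hx with rfl | hx'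
      · exact ⟨by omega, by omega⟩
      · obtain ⟨hax, hxb⟩ := hb x hx'
        rw [lt_min_iff] at hxb
        exact ⟨by omega, by omega⟩

-- B's tuple list is strictly increasing under A's sort key
theorem pairwise_canon (L n_order na : Int) :
    (pvCanon L n_order na).Pairwise (fun a b => pvKey a < pvKey b) := by
  rw [pvCanon, List.cons_append, List.nil_append, List.pairwise_cons]
  constructor
  · intro y hy
    simp only [List.mem_flatMap, List.mem_map] at hy
    obtain ⟨m, _, a, _, tail, _, rfl⟩ := hy
    exact pvKey_lt_of_len_lt (by simp)
  · rw [List.pairwise_flatMap]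
    constructor
    · intro m hm
      rw [List.pairwise_flatMap]
      constructor
      · intro a _
        rw [List.pairwise_map]
        refine (pairwise_combsB _ _ _).imp_of_mem ?_
        intro s u hs hu hsu
        have els := ((mem_combsB _ _ _ s).mp hs).1
        have elu := ((mem_combsB _ _ _ u).mp hu).1
        exact pvKey_lt_of_tail_lt (by rw [els, elu]) hsu
      · refine (PySem.List.pairwise_lt_pyRange_one 0 L).imp_of_mem ?_
        intro a b _ _ hab x hx y hy
        obtain ⟨s, hs, rfl⟩ := List.mem_map.mp hx
        obtain ⟨u, hu, rfl⟩ := List.mem_map.mp hy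
        have els := ((mem_combsB _ _ _ s).mp hs).1
        have elu := ((mem_combsB _ _ _ u).mp hu).1
        exact pvKey_lt_of_head_lt (by rw [els, elu]) hab
    · refine (PySem.List.pairwise_lt_pyRange_one 1 (n_order + 1)).imp_of_mem ?_
      intro m1 m2 hm1 hm2 hlt
      rw [PySem.List.mem_pyRange_one] at hm1 hm2
      intro x hx y hy
      simp only [List.mem_flatMap, List.mem_map] at hx hy
      obtain ⟨a, _, s, hs, rfl⟩ := hx
      obtain ⟨b, _, u, hu, rfl⟩ := hy
      have els := ((mem_combsB _ _ _ s).mp hs).1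
      have elu := ((mem_combsB _ _ _ u).mp hu).1
      refine pvKey_lt_of_len_lt ?_
      simp only [List.length_cons, els, elu]
      omega

-- the sort key written as in the port, and instance bookkeeping for sorted
theorem pv_sorted_eq_canon_aux (xs ys : List (List Int)) (h : ys.Perm xs)
    (hp : ys.Pairwise (fun a b => pvKey a < pvKey b)) :
    PySem.List.sorted xs (fun x => (x.length : Int) :: x) = ys := by
  have e : (fun (a b : List ℤ) => a.decidableLT b) =
      (LinearOrder.toDecidableLT : DecidableLT (List ℤ)) :=
    funext fun a => funext fun b => Subsingleton.elim _ _
  show @PySem.List.sorted (List ℤ) (List ℤ) List.instLT (fun a b => a.decidableLT b)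
    xs (fun x => (x.length : Int) :: x) false = ys
  rw [e]
  refine @PySem.List.sorted_eq_of_perm_of_pairwise_lt (List ℤ) (List ℤ)
    List.instLinearOrder xs ys _ h ?_
  simpa [pvKey] using hp

theorem nodup_canon (L n_order na : Int) : (pvCanon L n_order na).Nodup :=
  (pairwise_canon L n_order na).imp
    (fun {a b} h => by rintro rfl; exact lt_irrefl _ h)

-- main case: a positive window width that fits in the sequence
theorem sorted_eq_canon (L n_order na : Int) (h1 : na ≤ L) (h2 : 0 ≤ n_order) (h3 : 0 < na) :
    PySem.List.sorted (PySem.Set.ofList (pvIts L n_order na))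
      (fun x => (x.length : Int) :: x) = pvCanon L n_order na := by
  refine pv_sorted_eq_canon_aux _ _ ?_ (pairwise_canon L n_order na)
  rw [List.perm_ext_iff_of_nodup (nodup_canon L n_order na) (PySem.Set.nodup_ofList _)]
  intro t
  rw [PySem.Set.mem_ofList]
  exact (mem_its_iff_mem_canon L n_order na h1 h2 h3 t).symm

-- degenerate case: no window at all, or a negative order
theorem its_eq_nil (L n_order na : Int) (h : L < na ∨ n_order < 0) :
    pvIts L n_order na = [] := by
  rcases h with h | h
  · have e : PySem.List.pyRange 0 (L - na + 1) 1 = [] :=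
      PySem.List.pyRange_one_eq_nil (by omega)
    rw [pvIts, e]; rfl
  · have e : PySem.List.pyRange 0 (n_order + 1) 1 = [] :=
      PySem.List.pyRange_one_eq_nil (by omega)
    rw [pvIts, e]
    simp
  
-- degenerate case: empty windows (na ≤ 0): only the empty tuple survives dedup
theorem mem_its_iff_nil (L n_order na : Int) (h1 : na ≤ L) (h2 : 0 ≤ n_order) (h3 : na ≤ 0)
    (t : List Int) : t ∈ pvIts L n_order na ↔ t = [] := by
  simp only [pvIts, List.mem_flatMap, PySem.List.mem_pyRange_one, mem_combosA]
  constructor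
  · rintro ⟨i, _, m, _, hsub, _⟩
    rw [PySem.List.pyRange_one_eq_nil (by omega), List.sublist_nil] at hsub
    exact hsub
  · rintro rfl
    exact ⟨0, ⟨le_refl 0, by omega⟩, 0, ⟨le_refl 0, by omega⟩, by simp⟩

theorem sorted_eq_single (L n_order na : Int) (h1 : na ≤ L) (h2 : 0 ≤ n_order) (h3 : na ≤ 0) :
    PySem.List.sorted (PySem.Set.ofList (pvIts L n_order na))
      (fun x => (x.length : Int) :: x) = [[]] := by
  refine pv_sorted_eq_canon_aux _ _ ?_ (by simp)
  rw [List.perm_ext_iff_of_nodup (by simp) (PySem.Set.nodup_ofList _)]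
  intro t
  rw [PySem.Set.mem_ofList, mem_its_iff_nil L n_order na h1 h2 h3 t]
  simp

-- the two bodies agree for every effective window width na
theorem pv_main (L n_order na : Int) :
    ("." ++ PySem.Str.join "+" ((PySem.List.sorted (PySem.Set.ofList
      ((PySem.List.pyRange 0 (L - na + 1) 1).foldl (fun its i =>
        (PySem.List.pyRange 0 (n_order + 1) 1).foldl (fun its m =>
          its ++ combosA (PySem.List.pyRange i (i + na) 1) m.toNat) its) []))
      (fun x => (x.length : Int) :: x)).map
        (fun it => PySem.Str.join "x" (it.map PySem.Int.toStr)))) =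
    (if na > L ∨ n_order < 0 then "."
     else "." ++ PySem.Str.join "+"
       (if na > 0 then
          [""] ++ (PySem.List.pyRange 1 (n_order + 1) 1).flatMap (fun m =>
            (PySem.List.pyRange 0 L 1).flatMap (fun a =>
              (combsB (a + 1) (min (a + na) L) (m - 1).toNat).map (fun tail =>
                PySem.Str.join "x" ((a :: tail).map PySem.Int.toStr))))
        else [""])) := by
  rw [itsA_eq L n_order na]
  by_cases hdeg : na > L ∨ n_order < 0
  · rw [if_pos hdeg, its_eq_nil L n_order na (by omega)]
    decide
  · rw [not_or, not_lt, not_lt] at hdeg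
    obtain ⟨h1, h2⟩ := hdeg
    rw [if_neg (by omega)]
    by_cases h3 : na > 0
    · rw [if_pos h3, sorted_eq_canon L n_order na h1 h2 h3]
      rw [pvCanon]
      simp only [List.map_flatMap, List.map_map, List.cons_append,
        List.nil_append, List.map_cons, List.map_nil, Function.comp_def]
      rfl
    · rw [if_neg h3, sorted_eq_single L n_order na h1 h2 (by omega)]
      decide

-- ===== VERDICT (by name: the statement is the Claim_ definition above) =====
theorem get_ohe_spec_str_spec : Claim_equal_get_ohe_spec_str := by
  intro L n_order n_adj _
  rw [Spec_get_ohe_spec_str]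
  cases n_adj with
  | none => exact pv_main L n_order L
  | some v => exact pv_main L n_order v
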